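-- pv_equiv track=rewrite | github.com/sheucm/hacker-rank | DP_BricksGame/sol.py | bricksGame
-- ===== SOURCE A (Python) =====
-- def bricksGame(arr):
--
--     ### Solution: DP(Bottom-up) + Greedy
--     DP = [0] * len(arr)
--
--     total = 0
--     for i in range(len(arr)-1, -1, -1):
--         total += arr[i]
--         if i >= len(arr) - 3:
--             DP[i] = total
--         else:
--             DP[i] = max(
--                 total - DP[i+1],
--                 total - DP[i+2],
--                 total - DP[i+3]
--             )
--     return DP[0]
-- ===== SOURCE B (Python) =====
-- def bricksGame(arr):
--     # Top-down memoized evaluation of the game recurrence, driven by an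
--     # explicit work stack (demand-driven), with prefix sums instead of a
--     # running total and no DP array.
--     n = len(arr)
--     prefix = [0]
--     for x in arr:
--         prefix.append(prefix[-1] + x)
--     total = prefix[n]
--     memo = {}
--     stack = [0]
--     while stack:
--         i = stack.pop()
--         if i in memo:
--             continue
--         if i >= n - 3:
--             memo[i] = total - prefix[i]
--         elif i + 1 in memo and i + 2 in memo and i + 3 in memo:
--             rest = total - prefix[i]
--             memo[i] = max(rest - memo[i + 1], rest - memo[i + 2], rest - memo[i + 3])
--         else:
--             stack.append(i)
--             for j in (i + 1, i + 2, i + 3):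
--                 if j not in memo:
--                     stack.append(j)
--                     break
--     return memo[0]
-- ===== Notes on version B (the rewrite author's own statement) =====
-- stated objective: alternative
-- what changed: Replaced the bottom-up DP-array loop (running suffix total, array filled right-to-left) with demand-driven top-down memoization: prefix sums computed forward, a dict memo and an explicit work stack that starts from index 0, pushes an index's first missing dependency, and computes an index only once its three dependencies are memoized.
import Mathlib
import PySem

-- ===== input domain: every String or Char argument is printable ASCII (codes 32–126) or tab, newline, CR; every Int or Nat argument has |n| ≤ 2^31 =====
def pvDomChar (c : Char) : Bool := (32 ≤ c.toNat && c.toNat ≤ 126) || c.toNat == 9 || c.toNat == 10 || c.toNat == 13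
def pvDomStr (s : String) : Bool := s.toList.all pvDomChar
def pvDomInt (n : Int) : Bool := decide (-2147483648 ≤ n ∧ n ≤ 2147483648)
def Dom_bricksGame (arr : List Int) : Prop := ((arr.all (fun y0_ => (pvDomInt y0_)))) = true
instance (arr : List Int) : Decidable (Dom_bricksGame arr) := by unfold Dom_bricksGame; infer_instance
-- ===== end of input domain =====

-- B replaces A's bottom-up DP array (running suffix total, filled right-to-left) with
-- demand-driven top-down memoization: forward prefix sums, a dict memo and an explicit
-- work stack expanding missing dependencies from index 0. Same O(n) cost ('alternative').

-- ===== PORT A =====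
-- one step of A's backward loop: total += arr[i]; fill DP[i]
def stepA (arr : List Int) (st : List Int × Int) (i : Int) : List Int × Int :=
  let total := st.2 + PySem.List.pyGetD arr i 0
  if (arr.length : Int) - 3 ≤ i then
    (st.1.set i.toNat total, total)
  else
    (st.1.set i.toNat
      (max (max (total - st.1.getD (i.toNat + 1) 0)
                (total - st.1.getD (i.toNat + 2) 0))
           (total - st.1.getD (i.toNat + 3) 0)), total)

def bricksGame (arr : List Int) : Int :=
  let r := (PySem.List.pyRange ((arr.length : Int) - 1) (-1) (-1)).foldl
             (stepA arr) (List.replicate arr.length 0, 0)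
  -- A returns DP[0]; on the empty list this raises IndexError (excluded by Pre_)
  PySem.List.pyGetD r.1 0 0

-- ===== PORT B =====
-- prefix = [0]; for x in arr: prefix.append(prefix[-1] + x)
def pfx (arr : List Int) : List Int :=
  arr.foldl (fun p x => p ++ [p.getLast?.getD 0 + x]) [0]

-- fuel bound for the while loop (a totality guard only; proved sufficient below):
-- every iteration strictly decreases this measure.
def uB (n : Nat) (m : PySem.Dict Int Int) : Nat :=
  ((List.range (max n 1)).filter (fun (k : Nat) => (m.get? (k : Int)).isNone)).length
def fB (m : PySem.Dict Int Int) (stack : List Int) : Nat :=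
  (stack.filter (fun e => m.contains e)).length
def measB (n : Nat) (stack : List Int) (m : PySem.Dict Int Int) : Nat :=
  uB n m * ((max n 1) + 1) * ((max n 1) + 2) + fB m stack * ((max n 1) + 2)
    + ((max n 1) - stack.length)

-- the while loop; the Lean list's HEAD is the top of Source B's stack (append/pop at the end)
def loopB (n : Nat) (pre : List Int) (total : Int) :
    Nat → List Int → PySem.Dict Int Int → PySem.Dict Int Int
  | 0, _, memo => memo          -- fuel exhausted: unreachable from bricksGame_alt (proved below)
  | _ + 1, [], memo => memo
  | fuel + 1, i :: s, memo =>
    if memo.contains i then loopB n pre total fuel s memo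
    else if (n : Int) - 3 ≤ i then
      loopB n pre total fuel s (memo.insert i (total - PySem.List.pyGetD pre i 0))
    else if memo.contains (i + 1) && memo.contains (i + 2) && memo.contains (i + 3) then
      let rest := total - PySem.List.pyGetD pre i 0
      loopB n pre total fuel s
        (memo.insert i
          (max (max (rest - memo.getD (i + 1) 0) (rest - memo.getD (i + 2) 0))
               (rest - memo.getD (i + 3) 0)))
    else
      let j := if memo.contains (i + 1) = false then i + 1
               else if memo.contains (i + 2) = false then i + 2 else i + 3
      loopB n pre total fuel (j :: i :: s) memo

def bricksGame_alt (arr : List Int) : Int :=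
  let n := arr.length
  let pre := pfx arr
  let total := PySem.List.pyGetD pre (n : Int) 0
  let memo := loopB n pre total (measB n [0] PySem.Dict.empty + 1) [0] PySem.Dict.empty
  -- memo[0]; always present when the loop ends (proved below)
  memo.getD 0 0

-- ===== PRECONDITION & SPEC =====
-- A raises IndexError (DP[0] on an empty DP array) on the empty list; excluded.
def Pre_bricksGame (arr : List Int) : Prop := arr ≠ []
instance (arr : List Int) : Decidable (Pre_bricksGame arr) := by unfold Pre_bricksGame; infer_instance
def pvWitness_bricksGame : List Int := ([1, 2, 3, 4, 5])

def Spec_bricksGame (arr : List Int) (out : Int) : Prop := out = bricksGame_alt arr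
instance (arr : List Int) (out : Int) : Decidable (Spec_bricksGame arr out) := by unfold Spec_bricksGame; infer_instance

-- ===== CLAIM (what is proved, stated in full; the proofs are below) =====
def Claim_equal_bricksGame : Prop := ∀ (arr : List Int), Dom_bricksGame arr → Pre_bricksGame arr → Spec_bricksGame arr (bricksGame arr)

-- ===== LEMMAS AND PROOFS =====

-- sum of arr[i:]
def suf (arr : List Int) (i : Nat) : Int := (arr.drop i).sum

-- the common recurrence both programs compute
def g (arr : List Int) (i : Nat) : Int :=
  if arr.length ≤ i + 3 then suf arr i
  else max (max (suf arr i - g arr (i + 1)) (suf arr i - g arr (i + 2)))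
           (suf arr i - g arr (i + 3))
termination_by arr.length - i

-- [m-1, m-2, …, 0] as Ints
def downList : Nat → List Int
  | 0 => []
  | n + 1 => (n : Int) :: downList n

lemma downList_eq (n : Nat) :
    (List.range n).map (fun (k : Nat) => (n : Int) - 1 - (k : Int)) = downList n := by
  induction n with
  | zero => rfl
  | succ m ih =>
    rw [List.range_succ_eq_map, downList]
    simp only [List.map_cons, List.map_map, List.cons.injEq]
    refine ⟨by omega, ?_⟩
    rw [← ih]
    apply List.map_congr_left; intro k _
    simp only [Function.comp_apply]; push_cast; ring

lemma pyRange_down (n : Nat) :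
    PySem.List.pyRange ((n : Int) - 1) (-1) (-1) = downList n := by
  rw [← downList_eq]
  unfold PySem.List.pyRange
  rw [if_neg (by norm_num : ¬ (-1 : Int) = 0), if_neg (by norm_num : ¬ (0 : Int) < -1)]
  by_cases h : (-1 : Int) < (n : Int) - 1
  · rw [if_pos h]
    have hc : (((n : Int) - 1 - -1 + - -1 - 1) / - -1).toNat = n := by
      have h2 : ((n : Int) - 1 - -1 + - -1 - 1) / - -1 = (n : Int) := by norm_num
      rw [h2]; omega
    rw [hc]
    show List.map (fun k : Nat => (n : Int) - 1 + -1 * (k : Int)) (List.range n) =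
      (List.range n).map (fun (k : Nat) => (n : Int) - 1 - (k : Int))
    apply List.map_congr_left; intro k _; ring
  · rw [if_neg h]
    have : n = 0 := by omega
    subst this; rfl

lemma suf_succ (arr : List Int) (m : Nat) (hm : m < arr.length) :
    suf arr m = arr.getD m 0 + suf arr (m + 1) := by
  unfold suf
  rw [List.drop_eq_getElem_cons hm, List.sum_cons, List.getD_eq_getElem arr 0 hm]

lemma pyGetD_nat (arr : List Int) (m : Nat) (hm : m < arr.length) :
    PySem.List.pyGetD arr (m : Int) 0 = arr.getD m 0 := by
  simp [PySem.List.pyGetD, PySem.List.pyGet?, PySem.List.pyIdx?, hm, List.getD]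

-- invariant of A's backward fold
lemma foldA (arr : List Int) :
    ∀ m, m ≤ arr.length → ∀ DP total, DP.length = arr.length →
      total = suf arr m →
      (∀ j, m ≤ j → j < arr.length → DP.getD j 0 = g arr j) →
      ((downList m).foldl (stepA arr) (DP, total)).1.length = arr.length ∧
      (∀ j, j < arr.length →
        ((downList m).foldl (stepA arr) (DP, total)).1.getD j 0 = g arr j) := by
  intro m
  induction m with
  | zero =>
    intro _ DP total hlen _ hinv
    exact ⟨hlen, fun j hj => hinv j (Nat.zero_le j) hj⟩
  | succ m ih =>
    intro hm DP total hlen htot hinv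
    have hmlt : m < arr.length := hm
    simp only [downList, List.foldl_cons]
    have hstep : stepA arr (DP, total) (m : Int) =
        (DP.set m (g arr m), suf arr m) := by
      unfold stepA
      simp only [pyGetD_nat arr m hmlt]
      have htot' : total + arr.getD m 0 = suf arr m := by
        rw [htot, suf_succ arr m hmlt]; ring
      by_cases hc : (arr.length : Int) - 3 ≤ (m : Int)
      · have hg : g arr m = suf arr m := by
          rw [g]; rw [if_pos (by omega)]
        rw [if_pos hc, Int.toNat_natCast, htot', hg]
      · rw [if_neg hc]
        have h3 : m + 3 < arr.length := by omega
        have hg : g arr m =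
            max (max (suf arr m - g arr (m + 1)) (suf arr m - g arr (m + 2)))
                (suf arr m - g arr (m + 3)) := by
          rw [g]; rw [if_neg (by omega)]
        rw [Int.toNat_natCast, htot',
            hinv (m + 1) (by omega) (by omega), hinv (m + 2) (by omega) (by omega),
            hinv (m + 3) (by omega) h3, ← hg]
    rw [hstep]
    apply ih (by omega)
    · simpa using hlen
    · rfl
    · intro j hj hjlt
      rcases Nat.eq_or_lt_of_le hj with rfl | hlt
      · rw [List.getD, List.getElem?_set_self (by omega), Option.getD_some]
      · rw [List.getD, List.getElem?_set_ne (by omega), ← List.getD]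
        exact hinv j (by omega) hjlt

-- ---- B-side lemmas ----

-- prefix list characterisation
def offs (s : Int) : List Int → List Int
  | [] => []
  | x :: xs => (s + x) :: offs (s + x) xs

lemma foldl_offs (l : List Int) :
    ∀ acc : List Int, acc ≠ [] →
      l.foldl (fun p x => p ++ [p.getLast?.getD 0 + x]) acc
        = acc ++ offs (acc.getLast?.getD 0) l := by
  induction l with
  | nil => intro acc _; simp [offs]
  | cons x xs ih =>
    intro acc hacc
    simp only [List.foldl_cons]
    rw [ih (acc ++ [acc.getLast?.getD 0 + x]) (by simp)]
    rw [List.getLast?_concat]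
    simp [offs, List.append_assoc]

lemma offs_length (l : List Int) : ∀ s, (offs s l).length = l.length := by
  induction l with
  | nil => intro s; rfl
  | cons x xs ih => intro s; simp [offs, ih]

lemma offs_getD (l : List Int) :
    ∀ s (k : Nat), k < l.length → (offs s l).getD k 0 = s + (l.take (k + 1)).sum := by
  induction l with
  | nil => intro s k hk; simp at hk
  | cons x xs ih =>
    intro s k hk
    cases k with
    | zero => simp [offs]
    | succ m =>
      simp only [offs, List.getD_cons_succ, List.take_succ_cons, List.sum_cons]
      rw [ih (s + x) m (by simpa using hk)]
      ring

lemma pfx_eq (arr : List Int) : pfx arr = 0 :: offs 0 arr := by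
  unfold pfx
  rw [foldl_offs arr [0] (by simp)]
  rfl

lemma pfx_length (arr : List Int) : (pfx arr).length = arr.length + 1 := by
  rw [pfx_eq]; simp [offs_length]

lemma pfx_getD (arr : List Int) (k : Nat) (hk : k ≤ arr.length) :
    (pfx arr).getD k 0 = (arr.take k).sum := by
  rw [pfx_eq]
  cases k with
  | zero => simp
  | succ m =>
    simp only [List.getD_cons_succ]
    rw [offs_getD arr 0 m (by omega)]
    simp

lemma pfx_pyGetD (arr : List Int) (i : Int) (h0 : 0 ≤ i) (hn : i ≤ (arr.length : Int)) :
    PySem.List.pyGetD (pfx arr) i 0 = (arr.take i.toNat).sum := by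
  have hi : i = (i.toNat : Int) := by omega
  rw [hi, pyGetD_nat (pfx arr) i.toNat (by rw [pfx_length]; omega)]
  exact pfx_getD arr i.toNat (by omega)

lemma total_eq (arr : List Int) :
    PySem.List.pyGetD (pfx arr) (arr.length : Int) 0 = arr.sum := by
  rw [pfx_pyGetD arr _ (by omega) le_rfl]
  simp

lemma rest_eq (arr : List Int) (i : Int) (h0 : 0 ≤ i) (hn : i ≤ (arr.length : Int)) :
    PySem.List.pyGetD (pfx arr) (arr.length : Int) 0 - PySem.List.pyGetD (pfx arr) i 0
      = suf arr i.toNat := by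
  rw [total_eq, pfx_pyGetD arr i h0 hn]
  unfold suf
  have := List.sum_take_add_sum_drop arr i.toNat
  omega

-- strictly decreasing nonnegative Int lists are short
lemma declen (l : List Int) (B : Nat) (hp : l.Pairwise (fun a b => b < a))
    (hb : ∀ e ∈ l, 0 ≤ e ∧ e < (B : Int)) : l.length ≤ B := by
  have hnd : (l.map Int.toNat).Nodup := by
    have hlnd : l.Nodup := hp.imp (fun {a b} h => ne_of_gt h)
    refine List.Nodup.map_on ?_ hlnd
    intro a ha b hb' he
    have := (hb a ha).1; have := (hb b hb').1
    omega
  have hsub : l.map Int.toNat ⊆ List.range B := by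
    intro x hx
    rcases List.mem_map.mp hx with ⟨e, he, rfl⟩
    have := (hb e he).1; have := (hb e he).2
    simp only [List.mem_range]
    omega
  have := (hnd.subperm hsub).length_le
  simpa using this

-- counting lemma for the fuel measure
lemma countP_drop {α : Type} (p q : α → Bool) (a : α) :
    ∀ l : List α, l.Nodup → a ∈ l → p a = true → q a = false →
      (∀ b ∈ l, b ≠ a → q b = p b) → l.countP p = l.countP q + 1 := by
  intro l
  induction l with
  | nil => intro _ ha; simp at ha
  | cons x xs ih =>
    intro hnd hmem hpa hqa hpq
    rcases List.mem_cons.mp hmem with rfl | hxs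
    · have hxnot : a ∉ xs := (List.nodup_cons.mp hnd).1
      have heq : xs.countP q = xs.countP p := by
        apply List.countP_congr
        intro b hb
        rw [hpq b (List.mem_cons_of_mem _ hb) (fun h => hxnot (h ▸ hb))]
      simp [hpa, hqa, heq]
    · have hxa : x ≠ a := fun h => (List.nodup_cons.mp hnd).1 (h ▸ hxs)
      have hqx : q x = p x := hpq x List.mem_cons_self hxa
      rw [List.countP_cons, List.countP_cons, hqx,
          ih (List.nodup_cons.mp hnd).2 hxs hpa hqa
            (fun b hb => hpq b (List.mem_cons_of_mem _ hb))]
      omega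

lemma uB_insert (n : Nat) (m : PySem.Dict Int Int) (i v : Int)
    (h0 : 0 ≤ i) (hlt : i < ((max n 1 : Nat) : Int)) (hc : m.contains i = false) :
    uB n m = uB n (m.insert i v) + 1 := by
  unfold uB
  rw [← List.countP_eq_length_filter, ← List.countP_eq_length_filter]
  apply countP_drop _ _ i.toNat _ (List.nodup_range) (by simp; omega)
  · have : m.get? i = none := (PySem.Dict.get?_eq_none_iff_contains m i).mpr hc
    have hi : ((i.toNat : Nat) : Int) = i := by omega
    simp [hi, this]
  · have hi : ((i.toNat : Nat) : Int) = i := by omega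
    simp [hi, PySem.Dict.get?_insert_self]
  · intro b _ hb
    have hne : (b : Int) ≠ i := by
      intro h; apply hb; omega
    rw [PySem.Dict.get?_insert, if_neg hne]

lemma measkey (N u f2 t2 rf rt : Nat) (hN : 1 ≤ N) (hf2 : f2 ≤ N - 1) (ht2 : t2 ≤ N) (hu : 1 ≤ u) :
    (u - 1) * ((N + 1) * (N + 2)) + f2 * (N + 2) + t2 + 1
      ≤ u * ((N + 1) * (N + 2)) + rf * (N + 2) + rt := by
  have e1 : u * ((N + 1) * (N + 2)) = (u - 1) * ((N + 1) * (N + 2)) + (N + 1) * (N + 2) := by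
    conv_lhs => rw [← Nat.sub_add_cancel hu, Nat.add_mul, one_mul]
  have e2 : f2 * (N + 2) ≤ (N - 1) * (N + 2) := Nat.mul_le_mul_right _ hf2
  have e3 : (N - 1) * (N + 2) + 2 * (N + 2) = (N + 1) * (N + 2) := by
    rw [← Nat.add_mul]; congr 1; omega
  omega

lemma dict_contains_some {m : PySem.Dict Int Int} {k : Int} (h : m.contains k = true) :
    ∃ v, m.get? k = some v := by
  cases hg : m.get? k with
  | some v => exact ⟨v, rfl⟩
  | none =>
    rw [(PySem.Dict.get?_eq_none_iff_contains m k).mp hg] at h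
    cases h

lemma dict_not_contains_none {m : PySem.Dict Int Int} {k : Int} (h : m.contains k = false) :
    m.get? k = none := (PySem.Dict.get?_eq_none_iff_contains m k).mpr h

-- main invariant of B's loop: the result preserves memo entries, every entry is the
-- game value g, and every stacked index ends up memoized
lemma loopB_main (arr : List Int) :
    ∀ (fuel : Nat) (stack : List Int) (memo : PySem.Dict Int Int),
      stack.Pairwise (fun a b => b < a) →
      (∀ e ∈ stack, 0 ≤ e ∧ e < ((max arr.length 1 : Nat) : Int)) →
      measB arr.length stack memo < fuel →
      (∀ k v, memo.get? k = some v → v = g arr k.toNat) →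
      (∀ k v, memo.get? k = some v →
        (loopB arr.length (pfx arr) (PySem.List.pyGetD (pfx arr) (arr.length : Int) 0)
          fuel stack memo).get? k = some v) ∧
      (∀ k v,
        (loopB arr.length (pfx arr) (PySem.List.pyGetD (pfx arr) (arr.length : Int) 0)
          fuel stack memo).get? k = some v → v = g arr k.toNat) ∧
      (∀ e ∈ stack, ∃ v,
        (loopB arr.length (pfx arr) (PySem.List.pyGetD (pfx arr) (arr.length : Int) 0)
          fuel stack memo).get? e = some v) := by
  intro fuel
  induction fuel with
  | zero =>
    intro stack memo _ _ hf _
    exact absurd hf (by omega)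
  | succ fuel ih =>
    intro stack memo hp hb hf hg
    cases stack with
    | nil =>
      exact ⟨fun k v h => by simpa [loopB] using h,
             fun k v h => hg k v (by simpa [loopB] using h), by simp⟩
    | cons i s =>
      have hi0 : 0 ≤ i := (hb i List.mem_cons_self).1
      have hiN : i < ((max arr.length 1 : Nat) : Int) := (hb i List.mem_cons_self).2
      have hlen1 : (i :: s).length ≤ max arr.length 1 := declen _ _ hp hb
      have hbtl : ∀ e ∈ s, 0 ≤ e ∧ e < ((max arr.length 1 : Nat) : Int) :=
        fun e he => hb e (List.mem_cons_of_mem _ he)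
      by_cases hc : memo.contains i = true
      · -- pop: i already memoized
        have heq : loopB arr.length (pfx arr)
              (PySem.List.pyGetD (pfx arr) (arr.length : Int) 0) (fuel + 1) (i :: s) memo
            = loopB arr.length (pfx arr)
              (PySem.List.pyGetD (pfx arr) (arr.length : Int) 0) fuel s memo := by
          simp only [loopB]; rw [if_pos hc]
        have hfb : fB memo (i :: s) = fB memo s + 1 := by
          simp [fB, hc]
        have hdec : measB arr.length s memo < fuel := by
          unfold measB at hf ⊢
          rw [hfb] at hf
          have hmul : (fB memo s + 1) * (max arr.length 1 + 2)
              = fB memo s * (max arr.length 1 + 2) + (max arr.length 1 + 2) := by ring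
          simp only [List.length_cons] at hf
          omega
        obtain ⟨m1, m2, m3⟩ := ih s memo hp.of_cons hbtl hdec hg
        rw [heq]
        refine ⟨m1, m2, ?_⟩
        intro e he
        rcases List.mem_cons.mp he with rfl | hes
        · obtain ⟨v, hv⟩ := dict_contains_some hc
          exact ⟨v, m1 e v hv⟩
        · exact m3 e hes
      · -- i not memoized
        have hcf : memo.contains i = false := by simpa using hc
        have hnone : memo.get? i = none := dict_not_contains_none hcf
        have hile : i ≤ (arr.length : Int) := by omega
        have hu1 : uB arr.length memo = uB arr.length (memo.insert i 0) + 1 :=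
          uB_insert arr.length memo i 0 hi0 hiN hcf
        -- measure decrease common to both insert branches (value-independent)
        have hdecI : ∀ v : Int, measB arr.length s (memo.insert i v) < fuel := by
          intro v
          have hu : uB arr.length memo = uB arr.length (memo.insert i v) + 1 :=
            uB_insert arr.length memo i v hi0 hiN hcf
          have hf2 : fB (memo.insert i v) s ≤ max arr.length 1 - 1 := by
            have := List.length_filter_le (fun e => (memo.insert i v).contains e) s
            have : fB (memo.insert i v) s ≤ s.length := this
            simp only [List.length_cons] at hlen1
            omega
          have hkey := measkey (max arr.length 1) (uB arr.length memo)
            (fB (memo.insert i v) s) (max arr.length 1 - s.length)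
            (fB memo (i :: s)) (max arr.length 1 - (i :: s).length)
            (by omega) hf2 (by omega) (by omega)
          have hsub : uB arr.length memo - 1 = uB arr.length (memo.insert i v) := by omega
          rw [hsub] at hkey
          have ha1 : uB arr.length memo * (max arr.length 1 + 1) * (max arr.length 1 + 2)
              = uB arr.length memo * ((max arr.length 1 + 1) * (max arr.length 1 + 2)) := by ring
          have ha2 : uB arr.length (memo.insert i v) * (max arr.length 1 + 1) * (max arr.length 1 + 2)
              = uB arr.length (memo.insert i v) * ((max arr.length 1 + 1) * (max arr.length 1 + 2)) := by
            ring
          unfold measB at hf ⊢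
          omega
        -- Good is preserved by inserting the correct value at i
        have hgI : ∀ v : Int, v = g arr i.toNat →
            (∀ k w, (memo.insert i v).get? k = some w → w = g arr k.toNat) := by
          intro v hv k w hkw
          rcases eq_or_ne k i with rfl | hk
          · rw [PySem.Dict.get?_insert_self] at hkw
            cases hkw; exact hv
          · rw [PySem.Dict.get?_insert, if_neg hk] at hkw
            exact hg k w hkw
        -- combine the ih conclusions for an insert branch
        have hcomb : ∀ v : Int, v = g arr i.toNat →
            (∀ k w, memo.get? k = some w →
              (loopB arr.length (pfx arr)
                (PySem.List.pyGetD (pfx arr) (arr.length : Int) 0)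
                fuel s (memo.insert i v)).get? k = some w) ∧
            (∀ k w,
              (loopB arr.length (pfx arr)
                (PySem.List.pyGetD (pfx arr) (arr.length : Int) 0)
                fuel s (memo.insert i v)).get? k = some w → w = g arr k.toNat) ∧
            (∀ e ∈ i :: s, ∃ w,
              (loopB arr.length (pfx arr)
                (PySem.List.pyGetD (pfx arr) (arr.length : Int) 0)
                fuel s (memo.insert i v)).get? e = some w) := by
          intro v hv
          obtain ⟨m1, m2, m3⟩ := ih s (memo.insert i v) hp.of_cons hbtl (hdecI v) (hgI v hv)
          refine ⟨?_, m2, ?_⟩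
          · intro k w hkw
            have hk : k ≠ i := by
              intro h; rw [h, hnone] at hkw; cases hkw
            exact m1 k w (by rw [PySem.Dict.get?_insert, if_neg hk]; exact hkw)
          · intro e he
            rcases List.mem_cons.mp he with rfl | hes
            · exact ⟨v, m1 e v (PySem.Dict.get?_insert_self memo e v)⟩
            · exact m3 e hes
        by_cases hge : (arr.length : Int) - 3 ≤ i
        · -- base case: memo[i] = total - prefix[i]
          have heq : loopB arr.length (pfx arr)
                (PySem.List.pyGetD (pfx arr) (arr.length : Int) 0) (fuel + 1) (i :: s) memo
              = loopB arr.length (pfx arr)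
                (PySem.List.pyGetD (pfx arr) (arr.length : Int) 0) fuel s
                (memo.insert i
                  (PySem.List.pyGetD (pfx arr) (arr.length : Int) 0
                    - PySem.List.pyGetD (pfx arr) i 0)) := by
            simp only [loopB]; rw [if_neg hc, if_pos hge]
          have hv : PySem.List.pyGetD (pfx arr) (arr.length : Int) 0
              - PySem.List.pyGetD (pfx arr) i 0 = g arr i.toNat := by
            rw [rest_eq arr i hi0 hile, g, if_pos (by omega)]
          rw [heq]
          exact hcomb _ hv
        · by_cases hd : (memo.contains (i + 1) && memo.contains (i + 2)
              && memo.contains (i + 3)) = true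
          · -- all three dependencies memoized: compute memo[i]
            have heq : loopB arr.length (pfx arr)
                  (PySem.List.pyGetD (pfx arr) (arr.length : Int) 0) (fuel + 1) (i :: s) memo
                = loopB arr.length (pfx arr)
                  (PySem.List.pyGetD (pfx arr) (arr.length : Int) 0) fuel s
                  (memo.insert i
                    (max (max ((PySem.List.pyGetD (pfx arr) (arr.length : Int) 0
                          - PySem.List.pyGetD (pfx arr) i 0) - memo.getD (i + 1) 0)
                        ((PySem.List.pyGetD (pfx arr) (arr.length : Int) 0
                          - PySem.List.pyGetD (pfx arr) i 0) - memo.getD (i + 2) 0))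
                      ((PySem.List.pyGetD (pfx arr) (arr.length : Int) 0
                          - PySem.List.pyGetD (pfx arr) i 0) - memo.getD (i + 3) 0))) := by
              simp only [loopB]; rw [if_neg hc, if_neg hge, if_pos hd]
            have hd1 : memo.contains (i + 1) = true := by
              rcases Bool.and_eq_true_iff.mp hd with ⟨h12, _⟩
              exact (Bool.and_eq_true_iff.mp h12).1
            have hd2 : memo.contains (i + 2) = true := by
              rcases Bool.and_eq_true_iff.mp hd with ⟨h12, _⟩
              exact (Bool.and_eq_true_iff.mp h12).2
            have hd3 : memo.contains (i + 3) = true := by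
              exact (Bool.and_eq_true_iff.mp hd).2
            have hgetd : ∀ d : Int, memo.contains (i + d) = true →
                memo.getD (i + d) 0 = g arr (i + d).toNat := by
              intro d hcd
              obtain ⟨w, hw⟩ := dict_contains_some hcd
              rw [PySem.Dict.getD_of_get?_eq_some memo 0 hw]
              exact hg _ w hw
            have hv : max (max ((PySem.List.pyGetD (pfx arr) (arr.length : Int) 0
                    - PySem.List.pyGetD (pfx arr) i 0) - memo.getD (i + 1) 0)
                  ((PySem.List.pyGetD (pfx arr) (arr.length : Int) 0
                    - PySem.List.pyGetD (pfx arr) i 0) - memo.getD (i + 2) 0))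
                ((PySem.List.pyGetD (pfx arr) (arr.length : Int) 0
                    - PySem.List.pyGetD (pfx arr) i 0) - memo.getD (i + 3) 0)
                = g arr i.toNat := by
              have h3lt : i + 3 < (arr.length : Int) := by omega
              have hrec : g arr i.toNat
                  = max (max (suf arr i.toNat - g arr (i.toNat + 1))
                        (suf arr i.toNat - g arr (i.toNat + 2)))
                      (suf arr i.toNat - g arr (i.toNat + 3)) := by
                conv_lhs => rw [g]
                rw [if_neg (by omega)]
              rw [rest_eq arr i hi0 hile,
                  hgetd 1 hd1, hgetd 2 hd2, hgetd 3 hd3,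
                  (by omega : (i + 1).toNat = i.toNat + 1),
                  (by omega : (i + 2).toNat = i.toNat + 2),
                  (by omega : (i + 3).toNat = i.toNat + 3), hrec]
            rw [heq]
            exact hcomb _ hv
          · -- push the first missing dependency
            have heq : loopB arr.length (pfx arr)
                  (PySem.List.pyGetD (pfx arr) (arr.length : Int) 0) (fuel + 1) (i :: s) memo
                = loopB arr.length (pfx arr)
                  (PySem.List.pyGetD (pfx arr) (arr.length : Int) 0) fuel
                  ((if memo.contains (i + 1) = false then i + 1
                    else if memo.contains (i + 2) = false then i + 2 else i + 3)
                    :: i :: s) memo := by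
              simp only [loopB]; rw [if_neg hc, if_neg hge, if_neg hd]
            set j : Int := (if memo.contains (i + 1) = false then i + 1
                    else if memo.contains (i + 2) = false then i + 2 else i + 3) with hj
            have hjrange : i < j ∧ j ≤ i + 3 := by
              rw [hj]; split_ifs <;> omega
            have hcj : memo.contains j = false := by
              rw [hj]
              split_ifs with h1 h2
              · exact h1
              · exact h2
              · simp only [Bool.not_eq_false] at h1 h2
                simp [h1, h2] at hd
                simpa using hd
            have hjN : j < ((max arr.length 1 : Nat) : Int) := by
              have : i + 3 < (arr.length : Int) := by omega
              omega
            have hp' : (j :: i :: s).Pairwise (fun a b => b < a) := by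
              refine List.Pairwise.cons ?_ hp
              intro e he
              rcases List.mem_cons.mp he with rfl | hes
              · exact hjrange.1
              · have := List.rel_of_pairwise_cons hp hes
                omega
            have hb' : ∀ e ∈ j :: i :: s, 0 ≤ e ∧ e < ((max arr.length 1 : Nat) : Int) := by
              intro e he
              rcases List.mem_cons.mp he with rfl | hes
              · exact ⟨by omega, hjN⟩
              · exact hb e hes
            have hlen2 : (j :: i :: s).length ≤ max arr.length 1 := declen _ _ hp' hb'
            have hdec : measB arr.length (j :: i :: s) memo < fuel := by
              have hfb1 : fB memo (i :: s) = fB memo s := by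
                simp [fB, hcf]
              have hfb2 : fB memo (j :: i :: s) = fB memo s := by
                simp [fB, hcf, hcj]
              unfold measB at hf ⊢
              rw [hfb1] at hf
              rw [hfb2]
              simp only [List.length_cons] at hf hlen2 ⊢
              omega
            obtain ⟨m1, m2, m3⟩ := ih (j :: i :: s) memo hp' hb' hdec hg
            rw [heq]
            exact ⟨m1, m2, fun e he => m3 e (List.mem_cons_of_mem _ he)⟩

lemma alt_eq_g (arr : List Int) : bricksGame_alt arr = g arr 0 := by
  obtain ⟨-, m2, m3⟩ := loopB_main arr (measB arr.length [0] PySem.Dict.empty + 1)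
    [0] PySem.Dict.empty (List.pairwise_singleton _ _)
    (by
      intro e he
      simp only [List.mem_singleton] at he
      subst he
      constructor
      · omega
      · omega)
    (by omega)
    (by
      intro k v h
      rw [PySem.Dict.get?_empty] at h
      cases h)
  obtain ⟨v, hv⟩ := m3 0 (by simp)
  have hval := m2 0 v hv
  unfold bricksGame_alt
  rw [PySem.Dict.getD_of_get?_eq_some _ 0 hv, hval]
  rfl

-- ===== VERDICT (by name: the statement is the Claim_ definition above) =====
theorem bricksGame_spec : Claim_equal_bricksGame := by
  intro arr _ hpre
  unfold Spec_bricksGame bricksGame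
  rw [pyRange_down]
  have hn : 0 < arr.length := List.length_pos_of_ne_nil hpre
  obtain ⟨hlen, hinv⟩ := foldA arr arr.length le_rfl
    (List.replicate arr.length 0) 0 (by simp) (by simp [suf]) (by omega)
  have h0 := hinv 0 hn
  rw [alt_eq_g]
  have hpg := pyGetD_nat (List.foldl (stepA arr) (List.replicate arr.length 0, 0) (downList arr.length)).1 0 (by omega)
  simp only [Nat.cast_zero] at hpg
  rw [hpg]
  exact h0
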